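-- pv_equiv track=rewrite | github.com/Joao-kouznetz/Projeto34Camadas | Cliente.py | cria_header_eop
-- ===== SOURCE A (Python) =====
-- def cria_header_eop(lista_pacotes):
--     lista_final=[]
--     lista_eop=[255,0,255]
--     num_pacotes=len(lista_pacotes)
--     for i in range(len(lista_pacotes)):
--         lista_header=[]
--         lista_header.append(num_pacotes)
--         lista_header.append((i+1))
--         lista_header.append(len(lista_pacotes[i]))
--         for t in range(9):
--             lista_header.append(0)
--         lista_final.append(lista_header)
--         lista_final.append(lista_pacotes[i])
--         lista_final.append(lista_eop)
--
--     lista_comtudo=[]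
--
--     for i in range(0,len(lista_final),3):
--         pacote=[]
--         for valor in  lista_final[i]:
--             pacote.append(valor)
--         for valor2 in lista_final[i+1]:
--             pacote.append(valor2)
--         for valor3 in lista_final[(i+2)]:
--             pacote.append(valor3)
--         lista_comtudo.append(pacote)
--
--
--     return lista_comtudo
-- ===== SOURCE B (Python) =====
-- def cria_header_eop(lista_pacotes):
--     num_pacotes = len(lista_pacotes)
--     resultado = []
--     for i, payload in enumerate(lista_pacotes):
--         resultado.append([num_pacotes, i + 1, len(payload)] + [0] * 9
--                          + list(payload) + [255, 0, 255])
--     return resultado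
-- ===== Notes on version B (the rewrite author's own statement) =====
-- stated objective: simpler
-- what changed: Single pass over enumerate(lista_pacotes) building each packet directly as header + payload copy + EOP, instead of building a flat triple list and regrouping it with a second index loop in steps of three.
import Mathlib
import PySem

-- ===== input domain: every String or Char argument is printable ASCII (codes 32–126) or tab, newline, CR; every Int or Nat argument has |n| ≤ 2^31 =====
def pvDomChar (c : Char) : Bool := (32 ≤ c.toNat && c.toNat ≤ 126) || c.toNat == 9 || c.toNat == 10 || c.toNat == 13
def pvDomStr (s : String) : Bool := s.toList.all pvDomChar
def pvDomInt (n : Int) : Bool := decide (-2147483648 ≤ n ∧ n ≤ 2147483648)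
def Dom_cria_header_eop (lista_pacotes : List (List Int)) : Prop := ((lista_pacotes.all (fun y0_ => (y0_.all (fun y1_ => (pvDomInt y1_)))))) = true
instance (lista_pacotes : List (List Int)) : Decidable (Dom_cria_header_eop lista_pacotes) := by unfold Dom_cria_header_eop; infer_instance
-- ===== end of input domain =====

-- B builds each packet in one pass over enumerate(lista_pacotes) instead of A's
-- flat triple list regrouped by a second index loop in steps of three (objective: simpler).

-- ===== PORT A =====
def cria_header_eop (lista_pacotes : List (List Int)) : List (List Int) :=
  let lista_eop : List Int := [255, 0, 255]
  let num_pacotes : Int := lista_pacotes.length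
  let lista_final : List (List Int) :=
    (PySem.List.pyRange 0 lista_pacotes.length 1).foldl (fun acc i =>
      let lista_header : List Int := [num_pacotes, i + 1,
        ((PySem.List.pyGetD lista_pacotes i []).length : Int)]
      let lista_header := (PySem.List.pyRange 0 9 1).foldl
        (fun h _ => h ++ [(0 : Int)]) lista_header
      ((acc ++ [lista_header]) ++ [PySem.List.pyGetD lista_pacotes i []]) ++ [lista_eop]) []
  (PySem.List.pyRange 0 lista_final.length 3).foldl (fun acc i =>
    let pacote := (PySem.List.pyGetD lista_final i []).foldl (fun p v => p ++ [v]) []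
    let pacote := (PySem.List.pyGetD lista_final (i + 1) []).foldl (fun p v => p ++ [v]) pacote
    let pacote := (PySem.List.pyGetD lista_final (i + 2) []).foldl (fun p v => p ++ [v]) pacote
    acc ++ [pacote]) []

-- ===== PORT B =====
def cria_header_eop_alt (lista_pacotes : List (List Int)) : List (List Int) :=
  let num_pacotes : Int := lista_pacotes.length
  (PySem.List.enumerate lista_pacotes).foldl (fun res ip =>
    res ++ [[num_pacotes, ip.1 + 1, (ip.2.length : Int)] ++ List.replicate 9 0
            ++ ip.2 ++ [255, 0, 255]]) []

-- ===== PRECONDITION & SPEC =====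
def Spec_cria_header_eop (lista_pacotes : List (List Int)) (out : List (List Int)) : Prop := out = cria_header_eop_alt lista_pacotes
instance (lista_pacotes : List (List Int)) (out : List (List Int)) : Decidable (Spec_cria_header_eop lista_pacotes out) := by unfold Spec_cria_header_eop; infer_instance

-- ===== CLAIM (what is proved, stated in full; the proofs are below) =====
def Claim_equal_cria_header_eop : Prop := ∀ (lista_pacotes : List (List Int)), Dom_cria_header_eop lista_pacotes → Spec_cria_header_eop lista_pacotes (cria_header_eop lista_pacotes)

-- ===== LEMMAS AND PROOFS =====

-- header of packet i (0-based), with the nine zeros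
def pvHdr (n i : Int) (p : List Int) : List Int :=
  [n, i + 1, (p.length : Int)] ++ List.replicate 9 0

-- append-accumulating foldl is init ++ map
theorem pv_foldl_app_map {α β : Type} (g : α → β) :
    ∀ (l : List α) (init : List β),
      l.foldl (fun acc x => acc ++ [g x]) init = init ++ l.map g := by
  intro l
  induction l with
  | nil => simp
  | cons x xs ih => intro init; simp [ih]

-- append-accumulating foldl with a list body is init ++ flatMap
theorem pv_foldl_app_flat {α β : Type} (g : α → List β) :
    ∀ (l : List α) (init : List β),
      l.foldl (fun acc x => acc ++ g x) init = init ++ l.flatMap g := by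
  intro l
  induction l with
  | nil => simp
  | cons x xs ih => intro init; simp [ih]

-- the nine-zeros inner loop
theorem pv_nine (L : List Int) :
    (PySem.List.pyRange 0 9 1).foldl (fun h _ => h ++ [(0 : Int)]) L
      = L ++ List.replicate 9 0 := by
  simp [PySem.List.pyRange_one, List.range_succ]

-- cons form of range(a, b, 3)
theorem pv_pyRange3_cons (a b : Int) (h : a < b) :
    PySem.List.pyRange a b 3 = a :: PySem.List.pyRange (a + 3) b 3 := by
  rw [PySem.List.pyRange_of_pos a b (by norm_num),
      PySem.List.pyRange_of_pos (a + 3) b (by norm_num)]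
  have hm : (if a < b then ((b - a + 3 - 1) / 3).toNat else 0)
      = (if a + 3 < b then ((b - (a + 3) + 3 - 1) / 3).toNat else 0) + 1 := by
    split_ifs <;> omega
  rw [hm, List.range_succ_eq_map]
  simp [Function.comp_def]
  intro k _; ring

-- the regroup loop over a flat triple list
theorem pv_phase2 (n : Int) (F : List (List Int)) :
    ∀ (ts : List (Int × List Int)) (pre : List (List Int)) (acc : List (List Int)),
      F = pre ++ ts.flatMap (fun ip => [pvHdr n ip.1 ip.2, ip.2, [255, 0, 255]]) →
      (PySem.List.pyRange pre.length F.length 3).foldl (fun acc i =>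
          acc ++ [(PySem.List.pyGetD F (i + 2) []).foldl (fun p v => p ++ [v])
                    ((PySem.List.pyGetD F (i + 1) []).foldl (fun p v => p ++ [v])
                      ((PySem.List.pyGetD F i []).foldl (fun p v => p ++ [v]) []))]) acc
        = acc ++ ts.map (fun ip => pvHdr n ip.1 ip.2 ++ ip.2 ++ [255, 0, 255]) := by
  intro ts
  induction ts with
  | nil =>
      intro pre acc hF
      subst hF
      rw [PySem.List.pyRange_of_pos _ _ (by norm_num : (0:Int) < 3)]
      simp
  | cons ip ts ih =>
      intro pre acc hF
      have hflat : ∀ (us : List (Int × List Int)),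
          (us.flatMap (fun ip => [pvHdr n ip.1 ip.2, ip.2, [(255:Int), 0, 255]])).length
            = 3 * us.length := by
        intro us; induction us with
        | nil => simp
        | cons u us ihu => simp [ihu]; ring
      have hlt : (pre.length : Int) < F.length := by
        subst hF; have := hflat (ip :: ts); simp_all
      rw [pv_pyRange3_cons _ _ hlt]
      simp only [List.foldl_cons]
      have g0 : PySem.List.pyGetD F (pre.length : Int) [] = pvHdr n ip.1 ip.2 := by
        rw [PySem.List.pyGetD_natCast]
        subst hF; simp [List.getD]
      have g1 : PySem.List.pyGetD F ((pre.length : Int) + 1) [] = ip.2 := by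
        have : ((pre.length : Int) + 1) = ((pre.length + 1 : Nat) : Int) := by omega
        rw [this, PySem.List.pyGetD_natCast]
        subst hF
        simp [List.getD]
      have g2 : PySem.List.pyGetD F ((pre.length : Int) + 2) [] = [(255:Int), 0, 255] := by
        have : ((pre.length : Int) + 2) = ((pre.length + 2 : Nat) : Int) := by omega
        rw [this, PySem.List.pyGetD_natCast]
        subst hF
        simp [List.getD]
      rw [g0, g1, g2]
      have hpre : ((pre ++ [pvHdr n ip.1 ip.2, ip.2, [(255:Int),0,255]]).length : Int)
          = (pre.length : Int) + 3 := by simp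
      have hF' : F = (pre ++ [pvHdr n ip.1 ip.2, ip.2, [(255:Int),0,255]])
          ++ ts.flatMap (fun ip => [pvHdr n ip.1 ip.2, ip.2, [255, 0, 255]]) := by
        subst hF; simp
      have := ih (pre ++ [pvHdr n ip.1 ip.2, ip.2, [(255:Int),0,255]])
        (acc ++ [[(255:Int),0,255].foldl (fun p v => p ++ [v])
                   (ip.2.foldl (fun p v => p ++ [v])
                     ((pvHdr n ip.1 ip.2).foldl (fun p v => p ++ [v]) []))]) hF'
      rw [hpre] at this
      rw [this]
      have hs : ∀ (l : List Int), (List.map (fun x => [x]) l).flatten = l := by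
        intro l; induction l with
        | nil => rfl
        | cons a l ihl => simp [ihl]
      simp [hs]

-- A's first loop builds exactly the flat triple list
theorem pv_phase1 (xs : List (List Int)) :
    (PySem.List.pyRange 0 xs.length 1).foldl (fun acc i =>
      let lista_header : List Int := [(xs.length : Int), i + 1,
        ((PySem.List.pyGetD xs i []).length : Int)]
      let lista_header := (PySem.List.pyRange 0 9 1).foldl
        (fun h _ => h ++ [(0 : Int)]) lista_header
      ((acc ++ [lista_header]) ++ [PySem.List.pyGetD xs i []]) ++ [[255, 0, 255]]) []
    = (PySem.List.enumerate xs).flatMap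
        (fun ip => [pvHdr (xs.length : Int) ip.1 ip.2, ip.2, [255, 0, 255]]) := by
  rw [PySem.List.enumerate_eq_map_pyRange xs [], List.flatMap_def, List.map_map]
  simp only [pv_nine, List.append_assoc]
  rw [pv_foldl_app_flat (fun i =>
        [[(xs.length : Int), i + 1, ((PySem.List.pyGetD xs i []).length : Int)]
           ++ List.replicate 9 0] ++ ([PySem.List.pyGetD xs i []] ++ [[255, 0, 255]]))
      (PySem.List.pyRange 0 (xs.length) 1) []]
  simp [pvHdr, Function.comp_def, PySem.List.len, List.flatMap_def]

-- B is the map form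
theorem pv_alt_eq (xs : List (List Int)) :
    cria_header_eop_alt xs
      = (PySem.List.enumerate xs).map
          (fun ip => pvHdr (xs.length : Int) ip.1 ip.2 ++ ip.2 ++ [255, 0, 255]) := by
  unfold cria_header_eop_alt
  rw [pv_foldl_app_map (fun ip : Int × List Int =>
        [(xs.length : Int), ip.1 + 1, (ip.2.length : Int)] ++ List.replicate 9 0
          ++ ip.2 ++ [255, 0, 255]) (PySem.List.enumerate xs) []]
  simp [pvHdr]

-- ===== VERDICT (by name: the statement is the Claim_ definition above) =====
theorem cria_header_eop_spec : Claim_equal_cria_header_eop := by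
  intro xs _
  unfold Spec_cria_header_eop cria_header_eop
  rw [pv_alt_eq]
  simp only [pv_phase1]
  have h := pv_phase2 (xs.length : Int)
    ((PySem.List.enumerate xs).flatMap
      (fun ip => [pvHdr (xs.length : Int) ip.1 ip.2, ip.2, [255, 0, 255]]))
    (PySem.List.enumerate xs) [] [] rfl
  simpa using h
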